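-- pv_equiv track=rewrite | github.com/cirosantilli/project-euler-solvers | solvers/466.py | _minimal_under_divisibility
-- ===== SOURCE A (Python) =====
-- from typing import Iterable, List, Tuple
--
-- def _minimal_under_divisibility(nums: Iterable[int]) -> Tuple[int, ...]:
--     """
--     Keep only elements that are not multiples of a smaller kept element.
--     This preserves the union of multiples for inclusion-exclusion.
--     """
--     uniq = sorted(set(x for x in nums if x > 1))
--     kept: List[int] = []
--     for x in uniq:
--         redundant = False
--         for y in kept:
--             if x % y == 0:
--                 redundant = True
--                 break
--         if not redundant:
--             kept.append(x)
--     return tuple(kept)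
-- ===== SOURCE B (Python) =====
-- def _minimal_under_divisibility(nums):
--     """An element is kept iff it has no proper divisor in the set itself:
--     one filter over the sorted set, no kept accumulator.  A proper divisor
--     of x is at most x // 2, so the ascending scan stops there."""
--     uniq = sorted(set(x for x in nums if x > 1))
--
--     def has_proper_divisor(x):
--         bound = x // 2
--         for y in uniq:
--             if y > bound:
--                 return False
--             if x % y == 0:
--                 return True
--         return False
--
--     return tuple(x for x in uniq if not has_proper_divisor(x))
-- ===== Notes on version B (the rewrite author's own statement) =====
-- stated objective: alternative
-- what changed: B replaces A's sequential kept-list accumulation (each candidate tested against previously kept elements) with a single order-independent filter: an element is kept iff no proper divisor of it occurs anywhere in the sorted set, tested by an ascending scan cut off at y > x // 2; a loop invariant proves the two criteria coincide on a sorted distinct list.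
import Mathlib
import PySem

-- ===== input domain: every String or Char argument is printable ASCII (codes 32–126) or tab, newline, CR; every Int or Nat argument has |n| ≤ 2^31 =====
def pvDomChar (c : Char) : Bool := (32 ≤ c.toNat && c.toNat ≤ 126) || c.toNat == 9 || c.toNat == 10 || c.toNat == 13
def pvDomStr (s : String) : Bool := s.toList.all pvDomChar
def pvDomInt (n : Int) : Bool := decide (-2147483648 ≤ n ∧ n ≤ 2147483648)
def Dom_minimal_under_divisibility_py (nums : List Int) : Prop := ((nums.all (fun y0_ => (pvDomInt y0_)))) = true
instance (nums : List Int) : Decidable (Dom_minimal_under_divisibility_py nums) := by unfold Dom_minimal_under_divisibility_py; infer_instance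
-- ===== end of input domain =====

-- B keeps exactly the elements with no proper divisor in the set itself — one filter over
-- the set, no kept-list accumulator (alternative decomposition, same asymptotic cost).
-- ===== PORT A =====
-- inner 'for y in kept: if x % y == 0: redundant = True; break' = any over kept
def pyGoA (kept : List Int) (l : List Int) : List Int :=
  match l with
  | [] => kept
  | x :: t =>
    let redundant := kept.any (fun y => PySem.Int.mod x y == 0)
    if redundant then pyGoA kept t else pyGoA (kept ++ [x]) t

def minimal_under_divisibility_py (nums : List Int) : List Int :=
  pyGoA [] (PySem.List.sorted (PySem.Set.ofList (nums.filter (fun x => 1 < x))) (fun x => x) false)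

-- ===== PORT B =====
-- 'for y in uniq: if y > bound: return False; if x % y == 0: return True' then 'return False'
def hasPD (bound x : Int) : List Int → Bool
  | [] => false
  | y :: t => if y > bound then false else if PySem.Int.mod x y == 0 then true else hasPD bound x t

def minimal_under_divisibility_py_alt (nums : List Int) : List Int :=
  let uniq := PySem.List.sorted (PySem.Set.ofList (nums.filter (fun x => 1 < x))) (fun x => x) false
  uniq.filter (fun x => !hasPD (PySem.Int.floordiv x 2) x uniq)

-- ===== PRECONDITION & SPEC =====
def Spec_minimal_under_divisibility_py (nums : List Int) (out : List Int) : Prop := out = minimal_under_divisibility_py_alt nums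
instance (nums : List Int) (out : List Int) : Decidable (Spec_minimal_under_divisibility_py nums out) := by unfold Spec_minimal_under_divisibility_py; infer_instance

-- ===== CLAIM =====
def Claim_equal_minimal_under_divisibility_py : Prop := ∀ (nums : List Int), Dom_minimal_under_divisibility_py nums → Spec_minimal_under_divisibility_py nums (minimal_under_divisibility_py nums)

-- ===== LEMMAS AND PROOFS =====
-- Loop invariant: while A scans the sorted distinct list L (P processed, l remaining),
-- its kept list K rejects a remaining z exactly when some processed element divides z;
-- hence A's kept test at x coincides with B's "proper divisor anywhere in L" test.
theorem pyGoA_eq (L : List Int) (hs : L.Pairwise (· < ·)) (h1 : ∀ z ∈ L, 1 < z) :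
    ∀ (l P K : List Int), P ++ l = L →
      (∀ z ∈ l, K.any (fun y => PySem.Int.mod z y == 0) = P.any (fun y => PySem.Int.mod z y == 0)) →
      pyGoA K l = K ++ l.filter (fun x => !(L.any (fun y => y != x && PySem.Int.mod x y == 0))) := by
  intro l
  induction l with
  | nil => intro P K _ _; simp [pyGoA]
  | cons x t ih =>
    intro P K hPL hinv
    have hsplit : (P ++ x :: t).Pairwise (· < ·) := by rw [hPL]; exact hs
    obtain ⟨hP, hxt, hcross⟩ := List.pairwise_append.mp hsplit
    have hx1 : 1 < x := h1 x (by rw [← hPL]; simp)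
    have hPltx : ∀ p ∈ P, p < x := fun p hp => hcross p hp x (by simp)
    have htgtx : ∀ z ∈ t, x < z := fun z hz => (List.pairwise_cons.mp hxt).1 z hz
    -- the A-side redundancy test at x equals the B-side proper-divisor-in-L test
    have hpredx : (L.any (fun y => y != x && PySem.Int.mod x y == 0))
        = P.any (fun y => PySem.Int.mod x y == 0) := by
      rw [← hPL, Bool.eq_iff_iff]
      simp only [List.any_append, List.any_cons, Bool.or_eq_true, List.any_eq_true, bne_iff_ne,
        Bool.and_eq_true, beq_iff_eq, PySem.Int.mod_eq_zero_iff_dvd, ne_eq]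
      constructor
      · rintro (⟨y, hy, _, hdvd⟩ | ⟨⟨hne, _⟩ | ⟨y, hy, _, hdvd⟩⟩)
        · exact ⟨y, hy, hdvd⟩
        · simp at hne
        · exact absurd (Int.le_of_dvd (by omega) hdvd) (by have := htgtx y hy; omega)
      · rintro ⟨y, hy, hdvd⟩
        exact Or.inl ⟨y, hy, by have := hPltx y hy; omega, hdvd⟩
    have hdec := hinv x List.mem_cons_self
    by_cases hb : P.any (fun y => PySem.Int.mod x y == 0) = true
    · -- x redundant: dropped on both sides
      have hinv' : ∀ z ∈ t, K.any (fun y => PySem.Int.mod z y == 0)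
          = (P ++ [x]).any (fun y => PySem.Int.mod z y == 0) := by
        intro z hz
        have hKz := hinv z (List.mem_cons_of_mem x hz)
        rw [Bool.eq_iff_iff, hKz]
        simp only [List.any_append, List.any_cons, List.any_nil, Bool.or_false,
          Bool.or_eq_true, List.any_eq_true, beq_iff_eq, PySem.Int.mod_eq_zero_iff_dvd]
        constructor
        · exact Or.inl
        · rintro (h | hx)
          · exact h
          · -- x ∣ z: the kept divisor of x also divides z
            have hKx : K.any (fun y => PySem.Int.mod x y == 0) = true := by rw [hdec]; exact hb
            obtain ⟨k, hk, hkx⟩ := by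
              simpa only [List.any_eq_true, beq_iff_eq, PySem.Int.mod_eq_zero_iff_dvd] using hKx
            have : K.any (fun y => PySem.Int.mod z y == 0) = true := by
              simp only [List.any_eq_true, beq_iff_eq, PySem.Int.mod_eq_zero_iff_dvd]
              exact ⟨k, hk, dvd_trans hkx hx⟩
            rw [hKz, List.any_eq_true] at this
            simpa only [beq_iff_eq, PySem.Int.mod_eq_zero_iff_dvd] using this
      have hgoal := ih (P ++ [x]) K (by simpa using hPL) hinv'
      simp only [pyGoA, hdec, hb, if_true, List.filter_cons, hpredx, Bool.not_true,
        Bool.false_eq_true, if_false]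
      exact hgoal
    · -- x kept on both sides
      have hbf : P.any (fun y => PySem.Int.mod x y == 0) = false := Bool.eq_false_iff.mpr hb
      have hinv' : ∀ z ∈ t, (K ++ [x]).any (fun y => PySem.Int.mod z y == 0)
          = (P ++ [x]).any (fun y => PySem.Int.mod z y == 0) := by
        intro z hz
        simp only [List.any_append, hinv z (List.mem_cons_of_mem x hz)]
      have hgoal := ih (P ++ [x]) (K ++ [x]) (by simpa using hPL) hinv'
      simp only [pyGoA, hdec, hbf, Bool.false_eq_true, if_false, List.filter_cons, hpredx,
        Bool.not_false, if_true]
      rw [hgoal]; simp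

-- a proper divisor y of x (both > 1) satisfies y * 2 ≤ x
theorem two_mul_le_of_proper (y x : Int) (hy : 1 < y) (hx : 1 < x) (hne : y ≠ x)
    (hdvd : y ∣ x) : y * 2 ≤ x := by
  rcases hdvd with ⟨c, hcc⟩
  by_cases h : c ≤ 0
  · have hyc : y * c ≤ 0 := mul_nonpos_of_nonneg_of_nonpos (by omega) h
    have : x ≤ 0 := by rw [hcc]; exact hyc
    omega
  · by_cases h1 : c = 1
    · exact absurd (by rw [hcc, h1, mul_one]) hne
    · have h2 : 2 ≤ c := by omega
      have : y * 2 ≤ y * c := by nlinarith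
      rw [hcc]; exact this

-- On a sorted distinct list of elements > 1, the bounded scan hasPD finds
-- a divisor iff the list holds a proper divisor of x anywhere.
theorem hasPD_eq (x : Int) (hx : 1 < x) :
    ∀ L : List Int, L.Pairwise (· < ·) → (∀ z ∈ L, 1 < z) →
    hasPD (PySem.Int.floordiv x 2) x L = L.any (fun y => y != x && PySem.Int.mod x y == 0) := by
  have hfd : PySem.Int.floordiv x 2 = x / 2 := PySem.Int.floordiv_eq_ediv_of_pos (by norm_num)
  intro L
  induction L with
  | nil => intro _ _; rfl
  | cons y t ih =>
    intro hp h1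
    obtain ⟨hyt, hpt⟩ := List.pairwise_cons.mp hp
    have hy1 : 1 < y := h1 y List.mem_cons_self
    have h1t : ∀ z ∈ t, 1 < z := fun z hz => h1 z (List.mem_cons_of_mem y hz)
    simp only [hasPD, List.any_cons]
    by_cases hc : y > PySem.Int.floordiv x 2
    · -- cutoff: nothing in y :: t can be a proper divisor of x any more
      rw [if_pos hc, Bool.eq_iff_iff]
      simp only [Bool.false_eq_true, false_iff, Bool.or_eq_true, List.any_eq_true,
        bne_iff_ne, Bool.and_eq_true, beq_iff_eq, PySem.Int.mod_eq_zero_iff_dvd, ne_eq]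
      rw [hfd] at hc
      rintro (⟨hne, hdvd⟩ | ⟨w, hw, hne, hdvd⟩)
      · have := two_mul_le_of_proper y x hy1 hx hne hdvd
        omega
      · have hyw := hyt w hw
        have := two_mul_le_of_proper w x (h1t w hw) hx hne hdvd
        omega
    · rw [if_neg hc]
      by_cases hd : (PySem.Int.mod x y == 0) = true
      · -- y is a proper divisor (y * 2 ≤ x forces y ≠ x)
        rw [if_pos hd, Bool.eq_iff_iff]
        simp only [true_iff, Bool.or_eq_true, Bool.and_eq_true, bne_iff_ne, ne_eq]
        rw [hfd] at hc
        exact Or.inl ⟨by omega, hd⟩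
      · rw [if_neg hd, ih hpt h1t]
        have hterm : (y != x && (PySem.Int.mod x y == 0)) = false := by
          simp only [Bool.and_eq_false_iff]
          exact Or.inr (Bool.eq_false_iff.mpr hd)
        rw [hterm, Bool.false_or]

-- ===== VERDICT =====
theorem minimal_under_divisibility_py_spec : Claim_equal_minimal_under_divisibility_py := by
  intro nums _
  unfold Spec_minimal_under_divisibility_py minimal_under_divisibility_py minimal_under_divisibility_py_alt
  show pyGoA [] (PySem.List.sorted (PySem.Set.ofList (nums.filter (fun x => 1 < x))) (fun x => x) false)
      = List.filter
        (fun x => !hasPD (PySem.Int.floordiv x 2) x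
          (PySem.List.sorted (PySem.Set.ofList (nums.filter (fun x => 1 < x))) (fun x => x) false))
        (PySem.List.sorted (PySem.Set.ofList (nums.filter (fun x => 1 < x))) (fun x => x) false)
  have hs : (PySem.List.sorted (PySem.Set.ofList (nums.filter (fun x => 1 < x)))
      (fun x => x) false).Pairwise (· < ·) := PySem.List.sorted_ofList_pairwise_lt _
  have h1 : ∀ z ∈ PySem.List.sorted (PySem.Set.ofList (nums.filter (fun x => 1 < x)))
      (fun x => x) false, 1 < z := by
    intro z hz
    rw [PySem.List.mem_sorted, PySem.Set.mem_ofList, List.mem_filter] at hz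
    simpa using hz.2
  have key := pyGoA_eq _ hs h1
    (PySem.List.sorted (PySem.Set.ofList (nums.filter (fun x => 1 < x))) (fun x => x) false)
    [] [] (List.nil_append _) (by intro z _; rfl)
  rw [key, List.nil_append]
  refine List.filter_congr ?_
  intro x hx
  rw [hasPD_eq x (h1 x hx) _ hs h1]
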